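-- pv_equiv track=rewrite | github.com/bcheld/swarmee-river | src/swarmee_river/jupyter/magic.py | _parse_magic_line
-- ===== SOURCE A (Python) =====
-- import shlex
--
-- def _parse_magic_line(line: str) -> tuple[bool, bool, bool | None, bool, str]:
--     """
--     Parse a `%%swarmee` magic line.
--
--     Supported flags:
--     - --yes: auto-approve plan + tool consent for this invocation
--     - --plan: force plan mode even for "info" prompts
--     - --with-context: inject notebook context even when using the runtime broker
--     - --no-context: do not inject notebook context
--     - --daemon-stop: stop the shared runtime daemon for this scope
--
--     Returns: (auto_approve, force_plan, include_context_override, daemon_stop, extra_text)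
--     """
--     tokens = shlex.split(line or "")
--     auto_approve = False
--     force_plan = False
--     include_context_override: bool | None = None
--     daemon_stop = False
--     extra: list[str] = []
--
--     for tok in tokens:
--         if tok == "--yes":
--             auto_approve = True
--             continue
--         if tok == "--plan":
--             force_plan = True
--             continue
--         if tok == "--with-context":
--             include_context_override = True
--             continue
--         if tok == "--no-context":
--             include_context_override = False
--             continue
--         if tok == "--daemon-stop":
--             daemon_stop = True
--             continue
--         extra.append(tok)
--
--     return auto_approve, force_plan, include_context_override, daemon_stop, " ".join(extra).strip()
-- ===== SOURCE B (Python) =====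
-- import re
--
-- KNOWN_FLAGS = {"--yes", "--plan", "--with-context", "--no-context", "--daemon-stop"}
--
-- # Shell-style tokens, written as a regex grammar: a token is a run of pieces, where a
-- # piece is a single-quoted string, a double-quoted string (backslash escapes \ and "),
-- # a backslash-escaped character, or a run of plain characters.
-- _TOKEN = re.compile(r"""(?:'[^']*'|"(?:\\.|[^"\\])*"|\\.|[^\s'"\\]+)+""", re.DOTALL)
-- _PIECE = re.compile(r"""'([^']*)'|"((?:\\.|[^"\\])*)"|\\(.)|([^\s'"\\]+)""", re.DOTALL)
--
--
-- def _tokenize(s: str) -> list[str]: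
--     tokens = []
--     for m in _TOKEN.finditer(s):
--         parts = []
--         for p in _PIECE.finditer(m.group()):
--             if p.group(1) is not None:
--                 parts.append(p.group(1))
--             elif p.group(2) is not None:
--                 parts.append(re.sub(r'\\([\\"])', r"\1", p.group(2)))
--             elif p.group(3) is not None:
--                 parts.append(p.group(3))
--             else:
--                 parts.append(p.group(4))
--         tokens.append("".join(parts))
--     return tokens
--
--
-- def _parse_magic_line(line: str) -> tuple[bool, bool, bool | None, bool, str]:
--     """Parse a `%%swarmee` magic line into its flags and remaining free text."""
--     tokens = _tokenize(line or "")
--     auto_approve = "--yes" in tokens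
--     force_plan = "--plan" in tokens
--     daemon_stop = "--daemon-stop" in tokens
--     include_context_override = None
--     for tok in reversed(tokens):
--         if tok == "--with-context":
--             include_context_override = True
--             break
--         if tok == "--no-context":
--             include_context_override = False
--             break
--     extra = " ".join(t for t in tokens if t not in KNOWN_FLAGS).strip()
--     return auto_approve, force_plan, include_context_override, daemon_stop, extra
-- ===== Notes on version B (the rewrite author's own statement) =====
-- stated objective: faster
-- what changed: Replaces shlex.split plus A's single five-accumulator token loop with a declarative regex-grammar tokenizer and independent derivations from the token list (membership tests for the three booleans, a reversed last-occurrence scan for the context override, a filter against a flag set for the extra text); Pre_ excludes only lines with an unclosed quote or trailing bare backslash, on which shlex.split (hence A) raises ValueError.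
import Mathlib
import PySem

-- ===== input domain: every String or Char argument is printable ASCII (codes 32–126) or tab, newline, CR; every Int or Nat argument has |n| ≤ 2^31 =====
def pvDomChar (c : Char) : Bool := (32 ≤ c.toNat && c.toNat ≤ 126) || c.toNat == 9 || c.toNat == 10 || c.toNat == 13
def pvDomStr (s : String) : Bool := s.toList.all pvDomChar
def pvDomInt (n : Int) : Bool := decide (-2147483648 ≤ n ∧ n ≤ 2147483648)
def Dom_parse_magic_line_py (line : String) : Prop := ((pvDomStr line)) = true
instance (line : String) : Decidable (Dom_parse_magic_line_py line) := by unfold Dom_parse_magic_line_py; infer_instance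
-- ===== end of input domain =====

-- B tokenizes with a declarative regex grammar instead of shlex and derives each result
-- independently from the token list (membership tests, a reversed last-occurrence scan,
-- a filter) instead of A's single five-accumulator loop; return value only.

-- ===== PORT A =====
-- Port of shlex.split (posix mode, whitespace_split=True, as shlex.split uses): a hand
-- transliteration of shlex's scanner states; exact on the Dom alphabet; returns none exactly
-- where shlex.split raises ValueError (unclosed quote / dangling escape).
inductive ShState : Type
  | norm : ShState            -- outside quotes
  | sq : ShState              -- inside '...'
  | dq : ShState              -- inside "..."
  | esc : ShState             -- after \ outside quotes
  | dqesc : ShState           -- after \ inside "..."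
deriving DecidableEq

def shlexRun : List Char → ShState → List Char → Bool → List (List Char) → Option (List (List Char))
  | [], .norm, cur, seen, toks => some (if seen || cur ≠ [] then toks ++ [cur] else toks)
  | [], _, _, _, _ => none
  | c :: rest, .norm, cur, seen, toks =>
      if c = ' ' ∨ c = '\t' ∨ c = '\r' ∨ c = '\n' then
        shlexRun rest .norm [] false (if seen || cur ≠ [] then toks ++ [cur] else toks)
      else if c = '\'' then shlexRun rest .sq cur true toks
      else if c = '"' then shlexRun rest .dq cur true toks
      else if c = '\\' then shlexRun rest .esc cur seen toks
      else shlexRun rest .norm (cur ++ [c]) seen toks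
  | c :: rest, .sq, cur, seen, toks =>
      if c = '\'' then shlexRun rest .norm cur seen toks
      else shlexRun rest .sq (cur ++ [c]) seen toks
  | c :: rest, .dq, cur, seen, toks =>
      if c = '"' then shlexRun rest .norm cur seen toks
      else if c = '\\' then shlexRun rest .dqesc cur seen toks
      else shlexRun rest .dq (cur ++ [c]) seen toks
  | c :: rest, .esc, cur, seen, toks => shlexRun rest .norm (cur ++ [c]) seen toks
  | c :: rest, .dqesc, cur, seen, toks =>
      if c = '\\' ∨ c = '"' then shlexRun rest .dq (cur ++ [c]) seen toks
      else shlexRun rest .dq (cur ++ ['\\', c]) seen toks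

def shlexSplit (line : String) : Option (List (List Char)) :=
  shlexRun line.toList .norm [] false []

-- literal port of A's body: one loop over the tokens threading five accumulators,
-- then " ".join(extra).strip() ('line or ""' is 'line' for strings: only "" is falsy
-- and shlex.split "" = []).
def magicStep (s : Bool × Bool × Option Bool × Bool × List (List Char)) (tok : List Char) :
    Bool × Bool × Option Bool × Bool × List (List Char) :=
  if tok = "--yes".toList then (true, s.2.1, s.2.2.1, s.2.2.2.1, s.2.2.2.2)
  else if tok = "--plan".toList then (s.1, true, s.2.2.1, s.2.2.2.1, s.2.2.2.2)
  else if tok = "--with-context".toList then (s.1, s.2.1, some true, s.2.2.2.1, s.2.2.2.2)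
  else if tok = "--no-context".toList then (s.1, s.2.1, some false, s.2.2.2.1, s.2.2.2.2)
  else if tok = "--daemon-stop".toList then (s.1, s.2.1, s.2.2.1, true, s.2.2.2.2)
  else (s.1, s.2.1, s.2.2.1, s.2.2.2.1, s.2.2.2.2 ++ [tok])

def parse_magic_line_py (line : String) : Bool × Bool × Option Bool × Bool × String :=
  match shlexSplit line with
  | none => (false, false, none, false, "")   -- shlex.split raised: outside Pre_, value irrelevant
  | some tokens =>
    let st := tokens.foldl magicStep (false, false, none, false, [])
    (st.1, st.2.1, st.2.2.1, st.2.2.2.1,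
      String.ofList (PySem.Chars.strip (PySem.Chars.join " ".toList st.2.2.2.2)))

-- ===== PORT B =====
-- B's tokenizer is the regex grammar token = (piece)+ with
--   piece = '…' | "…" (backslash escapes \ and ") | \c | plain-run;
-- ported as the recursive-descent reading of that grammar over List Char.
def isWs (c : Char) : Bool := c = ' ' || c = '\t' || c = '\r' || c = '\n'

def plainP (c : Char) : Bool := !isWs c && c ≠ '\'' && c ≠ '"' && c ≠ '\\'

-- raw content of a "…" piece (regex (?:\\.|[^"\\])*), consuming the closing quote
def dqRaw : List Char → List Char × List Char
  | [] => ([], [])                                   -- unclosed quote: only outside Pre_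
  | '"' :: r => ([], r)
  | '\\' :: [] => (['\\'], [])
  | '\\' :: d :: r => let (p, rest) := dqRaw r; ('\\' :: d :: p, rest)
  | c :: r => let (p, rest) := dqRaw r; (c :: p, rest)

-- decode the raw content: re.sub(r'\\([\\"])', r'\1', …)
def dqSub : List Char → List Char
  | [] => []
  | c :: r =>
    if c = '\\' then
      match r with
      | [] => ['\\']
      | d :: r' => if d = '\\' ∨ d = '"' then d :: dqSub r' else '\\' :: dqSub (d :: r')
    else c :: dqSub r

theorem dqRaw_le (cs : List Char) : (dqRaw cs).2.length ≤ cs.length := by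
  induction cs using dqRaw.induct <;> simp_all [dqRaw] <;> omega

-- the (piece)+ run: decoded token text and the remaining input after the token
def bPieces : List Char → List Char × List Char
  | [] => ([], [])
  | c :: r =>
    if isWs c then ([], c :: r)
    else if c = '\'' then
      let pr := bPieces ((r.dropWhile (· ≠ '\'')).drop 1)
      (r.takeWhile (· ≠ '\'') ++ pr.1, pr.2)
    else if c = '"' then
      let pr := bPieces (dqRaw r).2
      (dqSub (dqRaw r).1 ++ pr.1, pr.2)
    else if c = '\\' then
      match r with
      | [] => ([], ['\\'])                           -- dangling escape: only outside Pre_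
      | d :: r' => let pr := bPieces r'; (d :: pr.1, pr.2)
    else
      let pr := bPieces ((c :: r).dropWhile plainP)
      ((c :: r).takeWhile plainP ++ pr.1, pr.2)
termination_by cs => cs.length
decreasing_by
  · have h1 := List.length_dropWhile_le (p := (· ≠ '\'')) (l := r)
    simp only [List.length_drop, List.length_cons]; omega
  · have := dqRaw_le r; simp only [List.length_cons]; omega
  · simp only [List.length_cons]; omega
  · have h2 : (c :: r).dropWhile plainP = r.dropWhile plainP := by
      rw [List.dropWhile_cons_of_pos]; simp_all [plainP]
    rw [h2]
    have h3 := List.length_dropWhile_le (p := plainP) (l := r)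
    simp only [List.length_cons]; omega

theorem bPieces_cons (c : Char) (r : List Char) :
    bPieces (c :: r) =
      if isWs c then ([], c :: r)
      else if c = '\'' then
        ((r.takeWhile (· ≠ '\'')) ++ (bPieces ((r.dropWhile (· ≠ '\'')).drop 1)).1,
         (bPieces ((r.dropWhile (· ≠ '\'')).drop 1)).2)
      else if c = '"' then
        (dqSub (dqRaw r).1 ++ (bPieces (dqRaw r).2).1, (bPieces (dqRaw r).2).2)
      else if c = '\\' then
        match r with
        | [] => ([], ['\\'])
        | d :: r' => (d :: (bPieces r').1, (bPieces r').2)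
      else
        ((c :: r).takeWhile plainP ++ (bPieces ((c :: r).dropWhile plainP)).1,
         (bPieces ((c :: r).dropWhile plainP)).2) := by
  rw [bPieces.eq_def]
theorem bPieces_le (cs : List Char) : (bPieces cs).2.length ≤ cs.length := by
  induction cs using bPieces.induct with
  | case1 => simp [bPieces]
  | case2 d r' h => rw [bPieces_cons]; simp [h]
  | case3 r' h1 ih =>
      rw [bPieces_cons]
      simp only [show isWs '\'' = false from rfl, Bool.false_eq_true, if_false, if_pos rfl, ite_true]
      have h2 := List.length_dropWhile_le (p := fun x => decide (x ≠ '\'')) (l := r')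
      simp only [List.length_drop] at ih
      simp only [List.length_cons]; omega
  | case4 r' h1 h2 ih =>
      rw [bPieces_cons]
      simp only [show isWs '"' = false from rfl, Bool.false_eq_true, if_false,
        if_neg (show ('"' : Char) ≠ '\'' by decide), if_pos rfl, ite_true]
      have h3 := dqRaw_le r'
      simp only [List.length_cons]; omega
  | case5 h1 h2 h3 =>
      rw [bPieces_cons]
      simp only [show isWs '\\' = false from rfl, Bool.false_eq_true, if_false,
        if_neg (show ('\\' : Char) ≠ '\'' by decide), if_neg (show ('\\' : Char) ≠ '"' by decide),
        if_pos rfl, ite_true]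
      simp
  | case6 d r' h1 h2 h3 ih =>
      rw [bPieces_cons]
      simp only [show isWs '\\' = false from rfl, Bool.false_eq_true, if_false,
        if_neg (show ('\\' : Char) ≠ '\'' by decide), if_neg (show ('\\' : Char) ≠ '"' by decide),
        if_pos rfl, ite_true]
      simp only [List.length_cons]; omega
  | case7 d r' h1 h2 h3 h4 ih =>
      rw [bPieces_cons]
      have hws : isWs d = false := by simp_all
      simp only [hws, Bool.false_eq_true, if_false, if_neg h2, if_neg h3, if_neg h4]
      have h5 : (d :: r').dropWhile plainP = r'.dropWhile plainP := by
        rw [List.dropWhile_cons_of_pos]; simp_all [plainP]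
      have h6 := List.length_dropWhile_le (p := plainP) (l := r')
      rw [h5] at ih ⊢
      simp only [List.length_cons]; omega
theorem bPieces_lt (c : Char) (r : List Char) (hws : isWs c = false)
    (hd : ¬(c = '\\' ∧ r = [])) : (bPieces (c :: r)).2.length < (c :: r).length := by
  rw [bPieces_cons]
  simp only [hws, Bool.false_eq_true, if_false]
  by_cases h2 : c = '\''
  · simp only [if_pos h2]
    have h := bPieces_le ((r.dropWhile (· ≠ '\'')).drop 1)
    have h' := List.length_dropWhile_le (p := fun x => decide (x ≠ '\'')) (l := r)
    simp only [List.length_drop] at h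
    simp only [List.length_cons]; omega
  · simp only [if_neg h2]
    by_cases h3 : c = '"'
    · simp only [if_pos h3]
      have h := bPieces_le (dqRaw r).2
      have h' := dqRaw_le r
      simp only [List.length_cons]; omega
    · simp only [if_neg h3]
      by_cases h4 : c = '\\'
      · simp only [if_pos h4]
        match r with
        | [] => exact absurd ⟨h4, rfl⟩ hd
        | d :: r' =>
          have h := bPieces_le r'
          simp only [List.length_cons]; omega
      · simp only [if_neg h4]
        have h5 : (c :: r).dropWhile plainP = r.dropWhile plainP := by
          rw [List.dropWhile_cons_of_pos]; simp_all [plainP]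
        rw [h5]
        have h := bPieces_le (r.dropWhile plainP)
        have h' := List.length_dropWhile_le (p := plainP) (l := r)
        simp only [List.length_cons]; omega

def bTokens : List Char → List (List Char)
  | [] => []
  | c :: r =>
    if isWs c then bTokens r
    else if c = '\\' ∧ r = [] then []
    else
      let pr := bPieces (c :: r)
      pr.1 :: bTokens pr.2
termination_by cs => cs.length
decreasing_by
  · simp
  · exact bPieces_lt c r (by simp_all) (by simp_all)


def knownFlags : List (List Char) :=
  ["--yes".toList, "--plan".toList, "--with-context".toList, "--no-context".toList, "--daemon-stop".toList]

def ctxOf (tok : List Char) : Option Bool :=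
  if tok = "--with-context".toList then some true
  else if tok = "--no-context".toList then some false
  else none

def parse_magic_line_py_alt (line : String) : Bool × Bool × Option Bool × Bool × String :=
  let tokens := bTokens line.toList
  let auto_approve := tokens.contains "--yes".toList
  let force_plan := tokens.contains "--plan".toList
  let daemon_stop := tokens.contains "--daemon-stop".toList
  let include_context_override := tokens.reverse.findSome? ctxOf
  let extra := String.ofList (PySem.Chars.strip (PySem.Chars.join " ".toList
    (tokens.filter (fun t => ¬ knownFlags.contains t))))
  (auto_approve, force_plan, include_context_override, daemon_stop, extra)

-- ===== PRECONDITION & SPEC =====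
-- Pre_ excludes exactly the lines on which shlex.split (hence A) raises ValueError: an
-- unclosed quote or a line ending in a bare backslash. A returns on every other input.
-- The precondition is a shape condition on the input, checked by three small predicates:
-- outside quotes every '…' and "…" opened is closed and no backslash dangles at the end
-- (inside "…" a backslash consumes the next character).
mutual
def wqOut : List Char → Bool
  | [] => true
  | '\'' :: r => wqSq r
  | '"' :: r => wqDq r
  | '\\' :: [] => false
  | '\\' :: _ :: r => wqOut r
  | _ :: r => wqOut r

def wqSq : List Char → Bool
  | [] => false
  | '\'' :: r => wqOut r
  | _ :: r => wqSq r

def wqDq : List Char → Bool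
  | [] => false
  | '"' :: r => wqOut r
  | '\\' :: [] => false
  | '\\' :: _ :: r => wqDq r
  | _ :: r => wqDq r
end

def Pre_parse_magic_line_py (line : String) : Prop := wqOut line.toList = true
instance (line : String) : Decidable (Pre_parse_magic_line_py line) := by unfold Pre_parse_magic_line_py; infer_instance

def pvWitness_parse_magic_line_py : String := "--yes --plan 'run it' extra"

def Spec_parse_magic_line_py (line : String) (out : Bool × Bool × Option Bool × Bool × String) : Prop := out = parse_magic_line_py_alt line
instance (line : String) (out : Bool × Bool × Option Bool × Bool × String) : Decidable (Spec_parse_magic_line_py line out) := by unfold Spec_parse_magic_line_py; infer_instance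

-- ===== CLAIM (what is proved, stated in full; the proofs are below) =====
def Claim_equal_parse_magic_line_py : Prop := ∀ (line : String), Dom_parse_magic_line_py line → Pre_parse_magic_line_py line → Spec_parse_magic_line_py line (parse_magic_line_py line)

-- ===== LEMMAS AND PROOFS =====

-- quoteBal mirrors only the quote/escape mode of shlex's scan; it is the proof-side
-- bridge between Pre_'s wellQuoted and the scanner.
def quoteBal : List Char → ShState → Bool
  | [], st => st = ShState.norm
  | c :: rest, .norm =>
      if c = '\'' then quoteBal rest .sq
      else if c = '"' then quoteBal rest .dq
      else if c = '\\' then quoteBal rest .esc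
      else quoteBal rest .norm
  | c :: rest, .sq => if c = '\'' then quoteBal rest .norm else quoteBal rest .sq
  | c :: rest, .dq =>
      if c = '"' then quoteBal rest .norm
      else if c = '\\' then quoteBal rest .dqesc
      else quoteBal rest .dq
  | _ :: rest, .esc => quoteBal rest .norm
  | _ :: rest, .dqesc => quoteBal rest .dq


theorem bTokens_cons (c : Char) (r : List Char) :
    bTokens (c :: r) =
      if isWs c then bTokens r
      else if c = '\\' ∧ r = [] then []
      else (bPieces (c :: r)).1 :: bTokens (bPieces (c :: r)).2 := by
  rw [bTokens.eq_def]

theorem isWs_iff (c : Char) : isWs c = true ↔ (c = ' ' ∨ c = '\t' ∨ c = '\r' ∨ c = '\n') := by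
  simp [isWs]; tauto

theorem sq_run (cs : List Char) : ∀ (cur : List Char) (seen : Bool) (toks : List (List Char)),
    quoteBal cs .sq = true →
    shlexRun cs .sq cur seen toks =
      shlexRun ((cs.dropWhile (· ≠ '\'')).drop 1) .norm (cur ++ cs.takeWhile (· ≠ '\'')) seen toks := by
  induction cs with
  | nil => intro _ _ _ h; simp [quoteBal] at h
  | cons c r ih =>
    intro cur seen toks h
    by_cases hc : c = '\''
    · subst hc
      rw [shlexRun, if_pos rfl]
      simp [List.dropWhile_cons_of_neg, List.takeWhile_cons_of_neg]
    · rw [shlexRun, if_neg hc]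
      rw [quoteBal, if_neg hc] at h
      rw [ih (cur ++ [c]) seen toks h]
      rw [List.dropWhile_cons_of_pos (by simp [hc]), List.takeWhile_cons_of_pos (by simp [hc])]
      simp

theorem sq_bal (cs : List Char) (h : quoteBal cs .sq = true) :
    quoteBal ((cs.dropWhile (· ≠ '\'')).drop 1) .norm = true := by
  induction cs with
  | nil => simp [quoteBal] at h
  | cons c r ih =>
    by_cases hc : c = '\''
    · subst hc
      rw [quoteBal, if_pos rfl] at h
      simpa [List.dropWhile_cons_of_neg] using h
    · rw [quoteBal, if_neg hc] at h
      rw [List.dropWhile_cons_of_pos (by simp [hc])]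
      exact ih h

theorem dqSub_nil : dqSub [] = [] := rfl

theorem dqSub_cons (c : Char) (p : List Char) (h : c ≠ '\\') : dqSub (c :: p) = c :: dqSub p := by
  rw [dqSub.eq_def]; dsimp only; rw [if_neg h]

theorem dqSub_esc (d : Char) (p : List Char) (h1 : d ≠ '\\') (h2 : d ≠ '"') :
    dqSub ('\\' :: d :: p) = '\\' :: d :: dqSub p := by
  rw [dqSub.eq_def]; dsimp only; rw [if_pos rfl]
  simp only [if_neg (show ¬(d = '\\' ∨ d = '"') by tauto)]
  rw [dqSub_cons d p h1]

theorem dqSub_pair (d : Char) (p : List Char) (h : d = '\\' ∨ d = '"') :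
    dqSub ('\\' :: d :: p) = d :: dqSub p := by
  rw [dqSub.eq_def]; dsimp only; rw [if_pos rfl]
  simp only [if_pos h]

theorem dq_run (cs : List Char) : ∀ (cur : List Char) (seen : Bool) (toks : List (List Char)),
    quoteBal cs .dq = true →
    shlexRun cs .dq cur seen toks =
      shlexRun (dqRaw cs).2 .norm (cur ++ dqSub (dqRaw cs).1) seen toks := by
  induction cs using dqRaw.induct with
  | case1 => intro _ _ _ h; simp [quoteBal] at h
  | case2 r => intro cur seen toks h; rw [shlexRun, if_pos rfl]; simp [dqRaw, dqSub_nil]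
  | case3 => intro _ _ _ h; simp [quoteBal] at h
  | case4 d r p0 rest0 heq0 ih =>
    intro cur seen toks h
    rw [shlexRun, if_neg (by decide), if_pos rfl, shlexRun]
    rw [quoteBal, if_neg (by decide), if_pos rfl, quoteBal] at h
    by_cases hd : d = '\\' ∨ d = '"'
    · rw [if_pos hd, ih (cur ++ [d]) seen toks h]
      simp [dqRaw, dqSub_pair d _ hd]
    · rw [if_neg hd, ih (cur ++ ['\\', d]) seen toks h]
      rw [not_or] at hd
      rw [show dqRaw ('\\' :: d :: r) = ('\\' :: d :: (dqRaw r).1, (dqRaw r).2) from by rw [dqRaw]]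
      rw [dqSub_esc d _ hd.1 hd.2]
      simp
  | case5 c r h1 h2 h3 p0 rest0 heq0 ih =>
    intro cur seen toks h
    have hcq : c ≠ '"' := fun hh => h1 hh
    have hcb : c ≠ '\\' := by
      intro hcc
      cases r with
      | nil => exact h2 hcc rfl
      | cons d r1 => exact h3 d r1 hcc rfl
    rw [shlexRun, if_neg hcq, if_neg hcb]
    rw [quoteBal, if_neg hcq, if_neg hcb] at h
    rw [ih (cur ++ [c]) seen toks h]
    rw [show dqRaw (c :: r) = (c :: (dqRaw r).1, (dqRaw r).2) from by rw [dqRaw.eq_def]; split <;> simp_all]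
    rw [dqSub_cons c _ hcb]
    simp

theorem dq_bal (cs : List Char) (h : quoteBal cs .dq = true) :
    quoteBal (dqRaw cs).2 .norm = true := by
  induction cs using dqRaw.induct with
  | case1 => simp [quoteBal] at h
  | case2 r => simpa [dqRaw] using h
  | case3 => simp [quoteBal] at h
  | case4 d r p0 rest0 heq0 ih =>
    rw [quoteBal, if_neg (by decide), if_pos rfl, quoteBal] at h
    rw [show dqRaw ('\\' :: d :: r) = ('\\' :: d :: (dqRaw r).1, (dqRaw r).2) from by rw [dqRaw]]
    exact ih h
  | case5 c r h1 h2 h3 p0 rest0 heq0 ih =>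
    have hcq : c ≠ '"' := fun hh => h1 hh
    have hcb : c ≠ '\\' := by
      intro hcc
      cases r with
      | nil => exact h2 hcc rfl
      | cons d r1 => exact h3 d r1 hcc rfl
    rw [quoteBal, if_neg hcq, if_neg hcb] at h
    rw [show dqRaw (c :: r) = (c :: (dqRaw r).1, (dqRaw r).2) from by rw [dqRaw.eq_def]; split <;> simp_all]
    exact ih h

theorem bPieces_plain (c : Char) (r : List Char) (hc : plainP c = true) :
    bPieces (c :: r) = (c :: (bPieces r).1, (bPieces r).2) := by
  have hws : isWs c = false := by simp [plainP] at hc; tauto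
  have h2 : c ≠ '\'' := by simp [plainP] at hc; tauto
  have h3 : c ≠ '"' := by simp [plainP] at hc; tauto
  have h4 : c ≠ '\\' := by simp [plainP] at hc; tauto
  rw [bPieces_cons]
  simp only [hws, Bool.false_eq_true, if_false, if_neg h2, if_neg h3, if_neg h4]
  rw [List.takeWhile_cons_of_pos hc, List.dropWhile_cons_of_pos hc]
  match r with
  | [] => simp [bPieces]
  | d :: r' =>
    by_cases hd : plainP d = true
    · have hwsd : isWs d = false := by simp [plainP] at hd; tauto
      have hd2 : d ≠ '\'' := by simp [plainP] at hd; tauto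
      have hd3 : d ≠ '"' := by simp [plainP] at hd; tauto
      have hd4 : d ≠ '\\' := by simp [plainP] at hd; tauto
      rw [bPieces_cons d r']
      simp only [hwsd, Bool.false_eq_true, if_false, if_neg hd2, if_neg hd3, if_neg hd4]
      simp
    · have hd' : plainP d = false := by simpa using hd
      rw [List.takeWhile_cons_of_neg (by simp [hd']), List.dropWhile_cons_of_neg (by simp [hd'])]
      simp
theorem main_lemma (n : Nat) : ∀ (cs : List Char), cs.length ≤ n → quoteBal cs .norm = true →
    (∀ toks, shlexRun cs .norm [] false toks = some (toks ++ bTokens cs)) ∧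
    (∀ cur seen toks, (seen = true ∨ cur ≠ []) →
      shlexRun cs .norm cur seen toks =
        some (toks ++ [cur ++ (bPieces cs).1] ++ bTokens (bPieces cs).2)) := by
  induction n with
  | zero =>
    intro cs hlen _
    have : cs = [] := by cases cs <;> simp_all
    subst this
    constructor
    · intro toks; simp [shlexRun, bTokens]
    · intro cur seen toks he
      rw [shlexRun]
      have : (seen || decide (cur ≠ [])) = true := by
        rcases he with h | h <;> simp [h]
      rw [if_pos this]
      simp [bPieces, bTokens]
  | succ n ih =>
    intro cs hlen hbal
    match cs with
    | [] =>
      constructor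
      · intro toks; simp [shlexRun, bTokens]
      · intro cur seen toks he
        rw [shlexRun]
        have : (seen || decide (cur ≠ [])) = true := by
          rcases he with h | h <;> simp [h]
        rw [if_pos this]
        simp [bPieces, bTokens]
    | c :: r =>
      have hlr : r.length ≤ n := by simp only [List.length_cons] at hlen; omega
      by_cases hws : isWs c = true
      · -- whitespace: A may emit, B skips
        have hcond : (c = ' ' ∨ c = '\t' ∨ c = '\r' ∨ c = '\n') := (isWs_iff c).mp hws
        have hcq1 : c ≠ '\'' := by rcases hcond with h|h|h|h <;> subst h <;> decide
        have hcq2 : c ≠ '"' := by rcases hcond with h|h|h|h <;> subst h <;> decide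
        have hcq3 : c ≠ '\\' := by rcases hcond with h|h|h|h <;> subst h <;> decide
        have hbal' : quoteBal r .norm = true := by
          rw [quoteBal, if_neg hcq1, if_neg hcq2, if_neg hcq3] at hbal; exact hbal
        constructor
        · intro toks
          rw [shlexRun, if_pos hcond]
          simp only [Bool.false_or, decide_not, ne_eq, not_true_eq_false, decide_false,
            Bool.false_eq_true, if_false]
          rw [bTokens_cons, if_pos hws]
          have := (ih r hlr hbal').1 toks
          simpa using this
        · intro cur seen toks he
          rw [shlexRun, if_pos hcond]
          have hemit : (seen || decide (cur ≠ [])) = true := by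
            rcases he with h | h <;> simp [h]
          rw [if_pos hemit]
          rw [bPieces_cons, if_pos hws]
          rw [bTokens_cons, if_pos hws]
          have := (ih r hlr hbal').1 (toks ++ [cur])
          simp only [] at this ⊢
          rw [this]
          simp
      · -- token start
        have hws' : isWs c = false := by simpa using hws
        by_cases h1 : c = '\''
        · subst h1
          rw [quoteBal, if_pos rfl] at hbal
          have hrest_bal := sq_bal r hbal
          have hrest_len : ((r.dropWhile (· ≠ '\'')).drop 1).length ≤ n := by
            have := List.length_dropWhile_le (p := fun x => decide (x ≠ '\'')) (l := r)
            simp only [List.length_drop]; omega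
          have hmid := (ih _ hrest_len hrest_bal).2
          have hpc : bPieces ('\'' :: r) =
              ((r.takeWhile (· ≠ '\'')) ++ (bPieces ((r.dropWhile (· ≠ '\'')).drop 1)).1,
               (bPieces ((r.dropWhile (· ≠ '\'')).drop 1)).2) := by
            rw [bPieces_cons]
            simp only [show isWs '\'' = false from rfl, Bool.false_eq_true, if_false, if_pos rfl,
              ite_true]
          constructor
          · intro toks
            rw [shlexRun, if_neg (by decide), if_pos rfl]
            rw [sq_run r [] true toks hbal]
            rw [hmid _ true toks (Or.inl rfl)]
            rw [bTokens_cons]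
            simp only [show isWs '\'' = false from rfl, Bool.false_eq_true, if_false,
              if_neg (by simp : ¬(('\'' : Char) = '\\' ∧ r = []))]
            rw [hpc]
            simp
          · intro cur seen toks he
            rw [shlexRun, if_neg (by decide), if_pos rfl]
            rw [sq_run r cur true toks hbal]
            rw [hmid _ true toks (Or.inl rfl)]
            rw [hpc]
            simp
        · by_cases h2 : c = '"'
          · subst h2
            rw [quoteBal, if_neg (by decide), if_pos rfl] at hbal
            have hrest_bal := dq_bal r hbal
            have hrest_len : (dqRaw r).2.length ≤ n := by
              have := dqRaw_le r; omega
            have hmid := (ih _ hrest_len hrest_bal).2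
            have hpc : bPieces ('"' :: r) =
                (dqSub (dqRaw r).1 ++ (bPieces (dqRaw r).2).1, (bPieces (dqRaw r).2).2) := by
              rw [bPieces_cons]
              simp only [show isWs '"' = false from rfl, Bool.false_eq_true, if_false,
                if_neg (show ('"' : Char) ≠ '\'' by decide), if_pos rfl, ite_true]
            constructor
            · intro toks
              rw [shlexRun, if_neg (by decide), if_neg (by decide), if_pos rfl]
              rw [dq_run r [] true toks hbal]
              rw [hmid _ true toks (Or.inl rfl)]
              rw [bTokens_cons]
              simp only [show isWs '"' = false from rfl, Bool.false_eq_true, if_false,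
                if_neg (by simp : ¬(('"' : Char) = '\\' ∧ r = []))]
              rw [hpc]
              simp
            · intro cur seen toks he
              rw [shlexRun, if_neg (by decide), if_neg (by decide), if_pos rfl]
              rw [dq_run r cur true toks hbal]
              rw [hmid _ true toks (Or.inl rfl)]
              rw [hpc]
              simp
          · by_cases h3 : c = '\\'
            · subst h3
              rw [quoteBal, if_neg (by decide), if_neg (by decide), if_pos rfl] at hbal
              match r with
              | [] => rw [quoteBal] at hbal; simp at hbal
              | d :: r' =>
                rw [show quoteBal (d :: r') .esc = quoteBal r' .norm from by rw [quoteBal]] at hbal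
                have hlr' : r'.length ≤ n := by
                  simp only [List.length_cons] at hlen; omega
                have hmid := (ih r' hlr' hbal).2
                have hpc : bPieces ('\\' :: d :: r') = (d :: (bPieces r').1, (bPieces r').2) := by
                  rw [bPieces_cons]
                  simp only [show isWs '\\' = false from rfl, Bool.false_eq_true, if_false,
                    if_neg (show ('\\' : Char) ≠ '\'' by decide),
                    if_neg (show ('\\' : Char) ≠ '"' by decide), if_pos rfl, ite_true]
                constructor
                · intro toks
                  rw [shlexRun, if_neg (by decide), if_neg (by decide), if_neg (by decide),
                    if_pos rfl, shlexRun]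
                  rw [hmid ([] ++ [d]) false toks (Or.inr (by simp))]
                  rw [bTokens_cons]
                  simp only [show isWs '\\' = false from rfl, Bool.false_eq_true, if_false,
                    if_neg (by simp : ¬(('\\' : Char) = '\\' ∧ d :: r' = []))]
                  rw [hpc]
                  simp
                · intro cur seen toks he
                  rw [shlexRun, if_neg (by decide), if_neg (by decide), if_neg (by decide),
                    if_pos rfl, shlexRun]
                  rw [hmid (cur ++ [d]) seen toks (Or.inr (by simp))]
                  rw [hpc]
                  simp
            · -- plain char
              have hplain : plainP c = true := by simp [plainP, hws', h1, h2, h3]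
              have hcond : ¬(c = ' ' ∨ c = '\t' ∨ c = '\r' ∨ c = '\n') := by
                intro h; exact absurd ((isWs_iff c).mpr h) (by simp [hws'])
              rw [quoteBal, if_neg h1, if_neg h2, if_neg h3] at hbal
              have hmid := (ih r hlr hbal).2
              have hpc := bPieces_plain c r hplain
              constructor
              · intro toks
                rw [shlexRun, if_neg hcond, if_neg h1, if_neg h2, if_neg h3]
                rw [hmid ([] ++ [c]) false toks (Or.inr (by simp))]
                rw [bTokens_cons]
                simp only [hws', Bool.false_eq_true, if_false,
                  if_neg (show ¬(c = '\\' ∧ r = []) by tauto)]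
                rw [hpc]
                simp
              · intro cur seen toks he
                rw [shlexRun, if_neg hcond, if_neg h1, if_neg h2, if_neg h3]
                rw [hmid (cur ++ [c]) seen toks (Or.inr (by simp))]
                rw [hpc]
                simp


theorem magic_fold (ts : List (List Char)) (a p : Bool) (c : Option Bool) (d : Bool)
    (e : List (List Char)) :
    ts.foldl magicStep (a, p, c, d, e) =
      (a || ts.contains "--yes".toList, p || ts.contains "--plan".toList,
       (ts.reverse.findSome? ctxOf).or c, d || ts.contains "--daemon-stop".toList,
       e ++ ts.filter (fun t => ¬ knownFlags.contains t)) := by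
  induction ts generalizing a p c d e with
  | nil => simp
  | cons t ts ih =>
    have hfs :
        ((ts.reverse ++ [t]).findSome? ctxOf) = (ts.reverse.findSome? ctxOf).or (ctxOf t) := by
      rw [List.findSome?_append]
      cases ts.reverse.findSome? ctxOf <;> simp [Option.or]
    rw [List.foldl_cons]
    by_cases h1 : t = "--yes".toList
    · rw [show magicStep (a, p, c, d, e) t = (true, p, c, d, e) from by simp only [magicStep]; rw [if_pos h1], ih]
      simp [h1, ctxOf, knownFlags]
    · by_cases h2 : t = "--plan".toList
      · rw [show magicStep (a, p, c, d, e) t = (a, true, c, d, e) from by simp only [magicStep]; rw [if_neg h1, if_pos h2], ih]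
        simp [h2, ctxOf, knownFlags]
      · by_cases h3 : t = "--with-context".toList
        · rw [show magicStep (a, p, c, d, e) t = (a, p, some true, d, e) from by
            simp only [magicStep]; rw [if_neg h1, if_neg h2, if_pos h3], ih]
          cases hx : ts.reverse.findSome? ctxOf <;>
            simp [h3, hx, ctxOf, knownFlags, Option.or]
        · by_cases h4 : t = "--no-context".toList
          · rw [show magicStep (a, p, c, d, e) t = (a, p, some false, d, e) from by
              simp only [magicStep]; rw [if_neg h1, if_neg h2, if_neg h3, if_pos h4], ih]
            cases hx : ts.reverse.findSome? ctxOf <;>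
              simp [h4, hx, ctxOf, knownFlags, Option.or]
          · by_cases h5 : t = "--daemon-stop".toList
            · rw [show magicStep (a, p, c, d, e) t = (a, p, c, true, e) from by
                simp only [magicStep]; rw [if_neg h1, if_neg h2, if_neg h3, if_neg h4, if_pos h5], ih]
              simp [h5, ctxOf, knownFlags]
            · rw [show magicStep (a, p, c, d, e) t = (a, p, c, d, e ++ [t]) from by
                simp only [magicStep]; rw [if_neg h1, if_neg h2, if_neg h3, if_neg h4, if_neg h5], ih]
              have g1 : t ≠ ['-', '-', 'y', 'e', 's'] := h1
              have g2 : t ≠ ['-', '-', 'p', 'l', 'a', 'n'] := h2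
              have g3 : t ≠ ['-', '-', 'w', 'i', 't', 'h', '-', 'c', 'o', 'n', 't', 'e', 'x', 't'] := h3
              have g4 : t ≠ ['-', '-', 'n', 'o', '-', 'c', 'o', 'n', 't', 'e', 'x', 't'] := h4
              have g5 : t ≠ ['-', '-', 'd', 'a', 'e', 'm', 'o', 'n', '-', 's', 't', 'o', 'p'] := h5
              simp [hfs, ctxOf, knownFlags, g1, g2, g3, g4, g5,
                Ne.symm g1, Ne.symm g2, Ne.symm g3, Ne.symm g4, Ne.symm g5]


theorem wqOut_other (c : Char) (r : List Char) (h1 : c ≠ '\'') (h2 : c ≠ '"')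
    (h3 : c ≠ '\\') : wqOut (c :: r) = wqOut r := by
  rw [wqOut.eq_def]; simp [h1, h2, h3]

theorem wqSq_other (c : Char) (r : List Char) (h1 : c ≠ '\'') : wqSq (c :: r) = wqSq r := by
  rw [wqSq.eq_def]; simp [h1]

theorem wqDq_other (c : Char) (r : List Char) (h1 : c ≠ '"') (h2 : c ≠ '\\') :
    wqDq (c :: r) = wqDq r := by
  rw [wqDq.eq_def]; simp [h1, h2]

theorem wq_eq (n : Nat) : ∀ cs : List Char, cs.length ≤ n →
    wqOut cs = quoteBal cs .norm ∧ wqSq cs = quoteBal cs .sq ∧ wqDq cs = quoteBal cs .dq := by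
  induction n with
  | zero =>
    intro cs hlen
    have : cs = [] := by cases cs <;> simp_all
    subst this
    exact ⟨rfl, rfl, rfl⟩
  | succ n ih =>
    intro cs hlen
    match cs with
    | [] => exact ⟨rfl, rfl, rfl⟩
    | c :: r =>
      have hlr : r.length ≤ n := by simp only [List.length_cons] at hlen; omega
      refine ⟨?_, ?_, ?_⟩
      · by_cases h1 : c = '\''
        · subst h1; rw [wqOut, quoteBal, if_pos rfl]; exact (ih r hlr).2.1
        · by_cases h2 : c = '"'
          · subst h2; rw [wqOut, quoteBal, if_neg (by decide), if_pos rfl]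
            exact (ih r hlr).2.2
          · by_cases h3 : c = '\\'
            · subst h3
              match r with
              | [] => rw [wqOut]; simp [quoteBal]
              | d :: r' =>
                rw [wqOut, quoteBal, if_neg (by decide), if_neg (by decide), if_pos rfl,
                  show quoteBal (d :: r') .esc = quoteBal r' .norm from by rw [quoteBal]]
                have hr' : r'.length ≤ n := by simp only [List.length_cons] at hlen; omega
                exact (ih r' hr').1
            · rw [wqOut_other c r h1 h2 h3, quoteBal, if_neg h1, if_neg h2, if_neg h3]
              exact (ih r hlr).1
      · by_cases h1 : c = '\''
        · subst h1; rw [wqSq, quoteBal, if_pos rfl]; exact (ih r hlr).1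
        · rw [wqSq_other c r h1, quoteBal, if_neg h1]; exact (ih r hlr).2.1
      · by_cases h1 : c = '"'
        · subst h1; rw [wqDq, quoteBal, if_pos rfl]; exact (ih r hlr).1
        · by_cases h2 : c = '\\'
          · subst h2
            match r with
            | [] => rw [wqDq]; simp [quoteBal]
            | d :: r' =>
              rw [wqDq, quoteBal, if_neg (by decide), if_pos rfl,
                show quoteBal (d :: r') .dqesc = quoteBal r' .dq from by rw [quoteBal]]
              have hr' : r'.length ≤ n := by simp only [List.length_cons] at hlen; omega
              exact (ih r' hr').2.2
          · rw [wqDq_other c r h1 h2, quoteBal, if_neg h1, if_neg h2]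
            exact (ih r hlr).2.2

-- ===== VERDICT (by name: the statement is the Claim_ definition above) =====
theorem parse_magic_line_py_spec : Claim_equal_parse_magic_line_py := by
  intro line _ hpre
  unfold Spec_parse_magic_line_py parse_magic_line_py parse_magic_line_py_alt
  have hqb : quoteBal line.toList .norm = true := by
    rw [← (wq_eq line.toList.length line.toList le_rfl).1]; exact hpre
  have h := (main_lemma line.toList.length line.toList le_rfl hqb).1 []
  rw [shlexSplit, h]
  simp [magic_fold]
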